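-- pv_equiv track=rewrite | github.com/miliar/Code_Jam_Webscraper | solutions_python/solutions_year16_round1_nr1/1610.py | recurse
-- ===== SOURCE A (Python) =====
-- beta = "ABCDEFGHIJKLMNOPQRSTUVWXYZ"
--
-- def recurse(start, last, bits, nxt):
--     n = nxt[-1]
--     i = beta.index(n)
--     if len(nxt) == 1:
--         if i >= last:
--             return bits + n
--         else:
--             return n + bits
--
--     elif i >= last:
--         bits = recurse(start, i, bits + n, nxt[:-1])
--     else:
--         bits = recurse(i, last, n + bits, nxt[:-1])
--
--     return bits
-- ===== SOURCE B (Python) =====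
-- beta = "ABCDEFGHIJKLMNOPQRSTUVWXYZ"
--
-- def recurse(start, last, bits, nxt):
--     for n in reversed(nxt):
--         i = beta.index(n)
--         if i >= last:
--             bits = bits + n
--             last = i
--         else:
--             bits = n + bits
--     return bits
-- ===== Notes on version B (the rewrite author's own statement) =====
-- stated objective: simpler
-- what changed: Replaces the recursion (which threads start/last/bits through nested calls and peels nxt[:-1] each level) by a single iterative loop over reversed(nxt) that appends-and-updates last or prepends, removing the O(n^2) list slicing and the recursion depth.
import Mathlib
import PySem

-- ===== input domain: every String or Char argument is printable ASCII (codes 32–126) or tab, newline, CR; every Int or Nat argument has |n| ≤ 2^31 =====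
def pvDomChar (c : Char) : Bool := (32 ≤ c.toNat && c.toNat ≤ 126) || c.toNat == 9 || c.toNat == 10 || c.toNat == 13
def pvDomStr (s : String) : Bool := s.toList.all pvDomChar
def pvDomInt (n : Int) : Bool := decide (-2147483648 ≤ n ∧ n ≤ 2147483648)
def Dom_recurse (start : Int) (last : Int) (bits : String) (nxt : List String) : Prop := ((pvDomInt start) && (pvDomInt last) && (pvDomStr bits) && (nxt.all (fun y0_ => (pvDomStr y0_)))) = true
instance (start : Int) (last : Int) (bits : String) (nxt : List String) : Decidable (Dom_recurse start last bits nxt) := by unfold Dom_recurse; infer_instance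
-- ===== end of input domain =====

-- B replaces A's recursion (peeling nxt[:-1] each level) by one iterative loop over
-- reversed(nxt), for simplicity; A mutates nothing observable.

def pvBeta : String := "ABCDEFGHIJKLMNOPQRSTUVWXYZ"

-- ===== PORT A =====
-- literal transliteration of A: n = nxt[-1] (getLast?, none = IndexError, excluded by Pre_),
-- i = beta.index(n) ported as PySem.Str.find (Pre_ guarantees the substring is found).
def recurse (start : Int) (last : Int) (bits : String) (nxt : List String) : String :=
  match hn : nxt.getLast? with
  | none => ""   -- nxt[-1] raises IndexError here; outside Pre_
  | some n =>
    let i : Int := PySem.Str.find pvBeta n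
    if nxt.length = 1 then
      if i ≥ last then bits ++ n else n ++ bits
    else if i ≥ last then
      recurse start i (bits ++ n) nxt.dropLast
    else
      recurse i last (n ++ bits) nxt.dropLast
termination_by nxt.length
decreasing_by
  all_goals
    have hne : nxt ≠ [] := by intro h; subst h; simp at hn
    have : 0 < nxt.length := List.length_pos_iff.mpr hne
    simp [List.length_dropLast]; omega

-- ===== PORT B =====
-- literal transliteration of Source B: a fold over reversed(nxt) carrying the (last, bits) state.
def recurse_alt (start : Int) (last : Int) (bits : String) (nxt : List String) : String :=
  (nxt.reverse.foldl
    (fun (acc : Int × String) n =>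
      let i : Int := PySem.Str.find pvBeta n
      if i ≥ acc.1 then (i, acc.2 ++ n) else (acc.1, n ++ acc.2))
    (last, bits)).2

-- ===== PRECONDITION & SPEC =====
-- Pre_ excludes exactly the inputs where Python A raises: empty nxt (IndexError at nxt[-1])
-- and any element that is not a substring of beta (ValueError from beta.index).
def Pre_recurse (start : Int) (last : Int) (bits : String) (nxt : List String) : Prop :=
  nxt ≠ [] ∧ ∀ s ∈ nxt, 0 ≤ PySem.Str.find pvBeta s
instance (start : Int) (last : Int) (bits : String) (nxt : List String) : Decidable (Pre_recurse start last bits nxt) := by unfold Pre_recurse; infer_instance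

def pvWitness_recurse : Int × Int × String × List String := (0, 0, "", ["B", "A"])

def Spec_recurse (start : Int) (last : Int) (bits : String) (nxt : List String) (out : String) : Prop := out = recurse_alt start last bits nxt
instance (start : Int) (last : Int) (bits : String) (nxt : List String) (out : String) : Decidable (Spec_recurse start last bits nxt out) := by unfold Spec_recurse; infer_instance

-- ===== CLAIM (what is proved, stated in full; the proofs are below) =====
def Claim_equal_recurse : Prop := ∀ (start : Int) (last : Int) (bits : String) (nxt : List String), Dom_recurse start last bits nxt → Pre_recurse start last bits nxt → Spec_recurse start last bits nxt (recurse start last bits nxt)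

-- ===== LEMMAS AND PROOFS =====

lemma recurse_eq_alt (nxt : List String) :
    ∀ (start last : Int) (bits : String), nxt ≠ [] →
      recurse start last bits nxt = recurse_alt start last bits nxt := by
  induction nxt using List.reverseRecOn with
  | nil => intro _ _ _ h; exact absurd rfl h
  | append_singleton ys x ih =>
    intro start last bits _
    have halt : ∀ (s l : Int) (b : String),
        recurse_alt s l b (ys ++ [x]) =
          if PySem.Str.find pvBeta x ≥ l
          then recurse_alt s (PySem.Str.find pvBeta x) (b ++ x) ys
          else recurse_alt s l (x ++ b) ys := by
      intro s l b
      unfold recurse_alt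
      simp only [List.reverse_append, List.reverse_singleton, List.singleton_append,
        List.foldl_cons]
      split <;> rfl
    by_cases hys : ys = []
    · subst hys
      rw [halt]
      unfold recurse recurse_alt
      simp
    · have hlen : (ys ++ [x]).length ≠ 1 := by
        have : 0 < ys.length := List.length_pos_iff.mpr hys
        simp [List.length_append]; omega
      rw [halt]
      unfold recurse
      split
      · next hn => simp at hn
      · next n hn =>
        have hx : n = x := by
          rw [List.getLast?_concat] at hn
          exact (Option.some.injEq _ _).mp hn.symm
        subst hx
        rw [if_neg hlen]
        simp only [List.dropLast_concat]
        by_cases hi : PySem.Str.find pvBeta n ≥ last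
        · rw [if_pos hi, if_pos hi, ih _ _ _ hys]
        · rw [if_neg hi, if_neg hi, ih _ _ _ hys]; rfl

-- ===== VERDICT (by name: the statement is the Claim_ definition above) =====
theorem recurse_spec : Claim_equal_recurse := by
  intro start last bits nxt _ hpre
  exact recurse_eq_alt nxt start last bits hpre.1
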